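-- pv_equiv track=rewrite | github.com/mikelane/greenhouse-mcp-server | src/greenhouse_mcp/tools/candidate.py | _derive_overall_status
-- ===== SOURCE A (Python) =====
-- from typing import TYPE_CHECKING, Any
--
-- def _derive_overall_status(application_stubs: list[dict[str, Any]]) -> str:
--     """Derive the candidate's overall status from their application statuses.
--
--     Args:
--         application_stubs: Application stub dicts with 'status' keys.
--
--     Returns:
--         The derived overall status string.
--     """
--     if not application_stubs:
--         return "no_applications"
--
--     statuses = [app.get("status", "rejected") for app in application_stubs]
--
--     if "active" in statuses:
--         return "active"
--     if "hired" in statuses: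
--         return "hired"
--     if "converted" in statuses:
--         return "converted"
--     return "rejected"
-- ===== SOURCE B (Python) =====
-- from typing import TYPE_CHECKING, Any
--
--
-- def _derive_overall_status(application_stubs: list[dict[str, Any]]) -> str:
--     """Derive the candidate's overall status from their application statuses."""
--     if not application_stubs:
--         return "no_applications"
--     rank_table = ["active", "hired", "converted", "rejected"]
--     priority = {"active": 0, "hired": 1, "converted": 2}
--     best = 3
--     for app in application_stubs:
--         best = min(best, priority.get(app.get("status", "rejected"), 3))
--     return rank_table[best]
-- ===== Notes on version B (the rewrite author's own statement) =====
-- stated objective: alternative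
-- what changed: Replaces A's build-a-statuses-list-then-three-membership-scans with a single accumulating pass that keeps the best (minimum) priority rank seen and indexes a rank table at the end.
import Mathlib
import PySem

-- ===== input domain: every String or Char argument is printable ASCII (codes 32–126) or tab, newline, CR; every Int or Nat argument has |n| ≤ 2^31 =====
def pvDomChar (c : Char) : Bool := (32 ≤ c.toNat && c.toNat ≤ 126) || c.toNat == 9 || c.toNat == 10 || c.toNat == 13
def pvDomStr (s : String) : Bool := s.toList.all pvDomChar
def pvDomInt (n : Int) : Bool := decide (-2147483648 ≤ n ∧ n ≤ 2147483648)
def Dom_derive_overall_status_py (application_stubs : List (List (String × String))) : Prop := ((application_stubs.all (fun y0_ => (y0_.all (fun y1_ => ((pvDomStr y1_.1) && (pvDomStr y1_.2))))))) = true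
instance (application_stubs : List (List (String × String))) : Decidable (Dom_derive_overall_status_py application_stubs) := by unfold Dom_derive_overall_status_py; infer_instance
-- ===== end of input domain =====

-- B replaces A's statuses-list plus three membership scans by one accumulating
-- minimum-priority-rank pass over the stubs; objective: alternative (same cost, different algorithm).

-- ===== PORT A =====
def derive_overall_status_py (application_stubs : List (List (String × String))) : String :=
  if application_stubs = [] then "no_applications"
  else
    let statuses := application_stubs.map (fun app => PySem.Dict.getD ⟨app⟩ "status" "rejected")
    if "active" ∈ statuses then "active"
    else if "hired" ∈ statuses then "hired"
    else if "converted" ∈ statuses then "converted"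
    else "rejected"

-- ===== PORT B =====
def pvRankTable : List String := ["active", "hired", "converted", "rejected"]
def pvPriority : PySem.Dict String Int := ⟨[("active", 0), ("hired", 1), ("converted", 2)]⟩
def derive_overall_status_py_alt (application_stubs : List (List (String × String))) : String :=
  if application_stubs = [] then "no_applications"
  else
    let best := application_stubs.foldl
      (fun best app =>
        min best (PySem.Dict.getD pvPriority (PySem.Dict.getD ⟨app⟩ "status" "rejected") 3)) 3
    -- rank_table[best]; best is provably in [0,3], so the index never raises
    (PySem.List.pyGet? pvRankTable best).getD ""

-- ===== PRECONDITION & SPEC =====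
def Spec_derive_overall_status_py (application_stubs : List (List (String × String))) (out : String) : Prop := out = derive_overall_status_py_alt application_stubs
instance (application_stubs : List (List (String × String))) (out : String) : Decidable (Spec_derive_overall_status_py application_stubs out) := by unfold Spec_derive_overall_status_py; infer_instance

-- ===== CLAIM (what is proved, stated in full; the proofs are below) =====
def Claim_equal_derive_overall_status_py : Prop := ∀ (application_stubs : List (List (String × String))), Dom_derive_overall_status_py application_stubs → Spec_derive_overall_status_py application_stubs (derive_overall_status_py application_stubs)

-- ===== LEMMAS AND PROOFS =====
def pvSt (app : List (String × String)) : String :=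
  PySem.Dict.getD ⟨app⟩ "status" "rejected"

def pvG (app : List (String × String)) : Int :=
  PySem.Dict.getD pvPriority (pvSt app) 3

def pvM (l : List (List (String × String))) : Int :=
  l.foldl (fun b app => min b (pvG app)) 3

theorem pvG_cases (app : List (String × String)) :
    pvG app = if pvSt app = "active" then 0 else if pvSt app = "hired" then 1
      else if pvSt app = "converted" then 2 else 3 := by
  unfold pvG pvPriority PySem.Dict.getD PySem.Dict.get?
  by_cases h1 : pvSt app = "active"
  · simp [List.find?, h1]
  · have e1 : ("active" == pvSt app) = false := beq_eq_false_iff_ne.mpr (fun h => h1 h.symm)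
    by_cases h2 : pvSt app = "hired"
    · simp [List.find?, h2]
    · have e2 : ("hired" == pvSt app) = false := beq_eq_false_iff_ne.mpr (fun h => h2 h.symm)
      by_cases h3 : pvSt app = "converted"
      · simp [List.find?, h3]
      · have e3 : ("converted" == pvSt app) = false := beq_eq_false_iff_ne.mpr (fun h => h3 h.symm)
        simp [List.find?, e1, e2, e3, h1, h2, h3]

theorem pvG_bounds (app : List (String × String)) : 0 ≤ pvG app ∧ pvG app ≤ 3 := by
  rw [pvG_cases]; split_ifs <;> omega

theorem pvG_eq_zero (app : List (String × String)) : pvG app = 0 ↔ pvSt app = "active" := by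
  rw [pvG_cases]; split_ifs <;> simp_all

theorem pvG_le_one (app : List (String × String)) :
    pvG app ≤ 1 ↔ (pvSt app = "active" ∨ pvSt app = "hired") := by
  rw [pvG_cases]; split_ifs <;> simp_all

theorem pvG_le_two (app : List (String × String)) :
    pvG app ≤ 2 ↔ (pvSt app = "active" ∨ pvSt app = "hired" ∨ pvSt app = "converted") := by
  rw [pvG_cases]; split_ifs <;> simp_all

theorem pvM_foldl (l : List (List (String × String))) (b : Int) (hb : b ≤ 3) :
    l.foldl (fun b app => min b (pvG app)) b = min b (pvM l) := by
  induction l generalizing b with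
  | nil => unfold pvM; simp; omega
  | cons a t ih =>
    unfold pvM
    simp only [List.foldl_cons]
    rw [ih (min b (pvG a)) (by omega), ih (min 3 (pvG a)) (by omega)]
    have := pvG_bounds a
    have ht3 : pvM t ≤ 3 := by
      have : t.foldl (fun b app => min b (pvG app)) 3 = min 3 (pvM t) := ih 3 (by omega)
      unfold pvM; rw [this]; omega
    unfold pvM; rw [ih 3 (by omega)]
    omega

theorem pvM_cons (a : List (String × String)) (t : List (List (String × String))) :
    pvM (a :: t) = min (pvG a) (pvM t) := by
  have := pvG_bounds a
  show (a :: t).foldl (fun b app => min b (pvG app)) 3 = _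
  simp only [List.foldl_cons]
  rw [pvM_foldl t (min 3 (pvG a)) (by omega)]
  omega

theorem pvM_bounds (l : List (List (String × String))) : 0 ≤ pvM l ∧ pvM l ≤ 3 := by
  induction l with
  | nil => unfold pvM; simp
  | cons a t ih => rw [pvM_cons]; have := pvG_bounds a; omega

theorem pvM_eq_zero (l : List (List (String × String))) :
    pvM l = 0 ↔ "active" ∈ l.map pvSt := by
  induction l with
  | nil => unfold pvM; simp
  | cons a t ih =>
    rw [pvM_cons]
    have ha := pvG_bounds a
    have ht := pvM_bounds t
    have h0 := pvG_eq_zero a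
    simp only [List.map_cons, List.mem_cons]
    constructor
    · intro h
      rcases (by omega : pvG a = 0 ∨ pvM t = 0) with h' | h'
      · exact Or.inl (h0.mp h').symm
      · exact Or.inr (ih.mp h')
    · rintro (h | h)
      · have := h0.mpr h.symm; omega
      · have := ih.mpr h; omega

theorem pvM_le_one (l : List (List (String × String))) :
    pvM l ≤ 1 ↔ ("active" ∈ l.map pvSt ∨ "hired" ∈ l.map pvSt) := by
  induction l with
  | nil => unfold pvM; simp
  | cons a t ih =>
    rw [pvM_cons]
    have ha := pvG_bounds a
    have ht := pvM_bounds t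
    have h1 := pvG_le_one a
    simp only [List.map_cons, List.mem_cons]
    constructor
    · intro h
      rcases (by omega : pvG a ≤ 1 ∨ pvM t ≤ 1) with h' | h'
      · rcases h1.mp h' with h'' | h''
        · exact Or.inl (Or.inl h''.symm)
        · exact Or.inr (Or.inl h''.symm)
      · rcases ih.mp h' with h'' | h''
        · exact Or.inl (Or.inr h'')
        · exact Or.inr (Or.inr h'')
    · rintro ((h | h) | (h | h))
      · have := h1.mpr (Or.inl ‹"active" = pvSt a›.symm); omega
      · have := ih.mpr (Or.inl ‹"active" ∈ List.map pvSt t›); omega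
      · have := h1.mpr (Or.inr ‹"hired" = pvSt a›.symm); omega
      · have := ih.mpr (Or.inr ‹"hired" ∈ List.map pvSt t›); omega

theorem pvM_le_two (l : List (List (String × String))) :
    pvM l ≤ 2 ↔ ("active" ∈ l.map pvSt ∨ "hired" ∈ l.map pvSt ∨ "converted" ∈ l.map pvSt) := by
  induction l with
  | nil => unfold pvM; simp
  | cons a t ih =>
    rw [pvM_cons]
    have ha := pvG_bounds a
    have ht := pvM_bounds t
    have h2 := pvG_le_two a
    simp only [List.map_cons, List.mem_cons]
    constructor
    · intro h
      rcases (by omega : pvG a ≤ 2 ∨ pvM t ≤ 2) with h' | h'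
      · rcases h2.mp h' with h'' | h'' | h''
        · exact Or.inl (Or.inl h''.symm)
        · exact Or.inr (Or.inl (Or.inl h''.symm))
        · exact Or.inr (Or.inr (Or.inl h''.symm))
      · rcases ih.mp h' with h'' | h'' | h''
        · exact Or.inl (Or.inr h'')
        · exact Or.inr (Or.inl (Or.inr h''))
        · exact Or.inr (Or.inr (Or.inr h''))
    · rintro ((h | h) | ((h | h) | (h | h)))
      · have := h2.mpr (Or.inl ‹"active" = pvSt a›.symm); omega
      · have := ih.mpr (Or.inl ‹"active" ∈ List.map pvSt t›); omega
      · have := h2.mpr (Or.inr (Or.inl ‹"hired" = pvSt a›.symm)); omega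
      · have := ih.mpr (Or.inr (Or.inl ‹"hired" ∈ List.map pvSt t›)); omega
      · have := h2.mpr (Or.inr (Or.inr ‹"converted" = pvSt a›.symm)); omega
      · have := ih.mpr (Or.inr (Or.inr ‹"converted" ∈ List.map pvSt t›)); omega

theorem alt_eq_rank (l : List (List (String × String))) (h : ¬ l = []) :
    derive_overall_status_py_alt l = (PySem.List.pyGet? pvRankTable (pvM l)).getD "" := by
  unfold derive_overall_status_py_alt
  rw [if_neg h]
  rfl

theorem rank_at : ∀ i : Int, 0 ≤ i → i ≤ 3 →
    (PySem.List.pyGet? pvRankTable i).getD "" =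
      (if i = 0 then "active" else if i = 1 then "hired"
       else if i = 2 then "converted" else "rejected") := by
  intro i h0 h3
  interval_cases i <;> decide

-- ===== VERDICT (by name: the statement is the Claim_ definition above) =====
theorem derive_overall_status_py_spec : Claim_equal_derive_overall_status_py := by
  intro l _
  unfold Spec_derive_overall_status_py
  by_cases hnil : l = []
  · subst hnil; rfl
  · rw [alt_eq_rank l hnil]
    unfold derive_overall_status_py
    rw [if_neg hnil]
    have hb := pvM_bounds l
    rw [rank_at (pvM l) hb.1 hb.2]
    show (if "active" ∈ l.map pvSt then "active"
          else if "hired" ∈ l.map pvSt then "hired"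
          else if "converted" ∈ l.map pvSt then "converted" else "rejected") = _
    have e0 := pvM_eq_zero l
    have e1 := pvM_le_one l
    have e2 := pvM_le_two l
    by_cases h0 : "active" ∈ l.map pvSt
    · have : pvM l = 0 := e0.mpr h0
      simp [h0, this]
    · by_cases h1 : "hired" ∈ l.map pvSt
      · have : pvM l = 1 := by
          have := e1.mpr (Or.inr h1)
          have := (not_iff_not.mpr e0).mpr (by simp [h0])
          omega
        simp [h0, h1, this]
      · by_cases h2 : "converted" ∈ l.map pvSt
        · have : pvM l = 2 := by
            have := e2.mpr (Or.inr (Or.inr h2))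
            have := (not_iff_not.mpr e1).mpr (by simp [h0, h1])
            omega
          simp [h0, h1, h2, this]
        · have : pvM l = 3 := by
            have := (not_iff_not.mpr e2).mpr (by simp [h0, h1, h2])
            omega
          simp [h0, h1, h2, this]
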